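-- pv_equiv track=rewrite | github.com/ukaji3/exstruct | src/exstruct/core/cells.py | _is_plausible_table
-- ===== SOURCE A (Python) =====
-- from collections.abc import Callable, Sequence
--
-- MatrixInput = Sequence[Sequence[object]] | Sequence[object]
--
-- def _ensure_matrix(matrix: MatrixInput) -> list[list[object]]:
--     rows_seq = list(matrix)
--     if not rows_seq:
--         return []
--     first = rows_seq[0]
--     if isinstance(first, Sequence) and not isinstance(first, str | bytes | bytearray):
--         normalized: list[list[object]] = []
--         for row in rows_seq:
--             if isinstance(row, Sequence) and not isinstance(
--                 row, str | bytes | bytearray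
--             ):
--                 normalized.append(list(row))
--             else:
--                 normalized.append([row])
--         return normalized
--     return [list(rows_seq)]
--
-- def _is_plausible_table(matrix: MatrixInput) -> bool:
--     """
--     Heuristic: require at least 2 rows and 2 cols with meaningful data.
--     - At least 2 rows have 2 以上の非空セル
--     - At least 2 columns have 2 以上の非空セル
--     """
--     normalized = _ensure_matrix(matrix)
--     if not normalized:
--         return False
--
--     rows = len(normalized)
--     cols = (
--         max((len(r) if isinstance(r, list) else 1) for r in normalized) if rows else 0
--     )
--     if rows < 2 or cols < 2:
--         return False
--
--     row_counts: list[int] = []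
--     col_counts = [0] * cols
--     for r in normalized:
--         cnt = 0
--         for j in range(cols):
--             v = r[j] if j < len(r) else None
--             if not (v is None or str(v).strip() == ""):
--                 cnt += 1
--                 col_counts[j] += 1
--         row_counts.append(cnt)
--
--     rows_with_two = sum(1 for c in row_counts if c >= 2)
--     cols_with_two = sum(1 for c in col_counts if c >= 2)
--     return rows_with_two >= 2 and cols_with_two >= 2
-- ===== SOURCE B (Python) =====
-- from collections.abc import Sequence
--
-- MatrixInput = Sequence[Sequence[object]] | Sequence[object]
--
--
-- def _ensure_matrix(matrix):
--     rows_seq = list(matrix)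
--     if not rows_seq:
--         return []
--     first = rows_seq[0]
--     if isinstance(first, Sequence) and not isinstance(first, str | bytes | bytearray):
--         normalized = []
--         for row in rows_seq:
--             if isinstance(row, Sequence) and not isinstance(
--                 row, str | bytes | bytearray
--             ):
--                 normalized.append(list(row))
--             else:
--                 normalized.append([row])
--         return normalized
--     return [list(rows_seq)]
--
--
-- def _is_plausible_table(matrix):
--     normalized = _ensure_matrix(matrix)
--     if not normalized:
--         return False
--
--     rows = len(normalized)
--     cols = max(len(r) if isinstance(r, list) else 1 for r in normalized)
--     if rows < 2 or cols < 2: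
--         return False
--
--     # Rectangular boolean mask: True iff the padded cell holds meaningful data.
--     mask = [
--         [
--             j < len(r) and not (r[j] is None or str(r[j]).strip() == "")
--             for j in range(cols)
--         ]
--         for r in normalized
--     ]
--     rows_with_two = sum(1 for rm in mask if sum(rm) >= 2)
--     cols_with_two = sum(1 for cm in zip(*mask) if sum(cm) >= 2)
--     return rows_with_two >= 2 and cols_with_two >= 2
-- ===== Notes on version B (the rewrite author's own statement) =====
-- stated objective: alternative
-- what changed: A counts non-empty cells inside one nested loop that simultaneously updates per-row and per-column counters; B instead builds a rectangular boolean mask once and derives the row tally by counting each mask row and the column tally by counting the transposed (zip(*mask)) columns.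
import Mathlib
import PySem

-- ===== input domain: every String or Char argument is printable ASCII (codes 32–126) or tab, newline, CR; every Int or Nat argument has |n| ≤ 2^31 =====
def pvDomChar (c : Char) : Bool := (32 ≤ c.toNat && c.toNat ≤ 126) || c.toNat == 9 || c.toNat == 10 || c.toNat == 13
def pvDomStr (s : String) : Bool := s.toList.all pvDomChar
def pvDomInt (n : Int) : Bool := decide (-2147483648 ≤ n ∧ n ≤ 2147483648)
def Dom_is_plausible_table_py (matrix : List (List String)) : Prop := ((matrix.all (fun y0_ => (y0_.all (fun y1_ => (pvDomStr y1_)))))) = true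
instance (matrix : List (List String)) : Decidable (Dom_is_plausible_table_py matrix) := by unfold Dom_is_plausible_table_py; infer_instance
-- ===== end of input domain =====

-- B replaces A's in-loop row/column counters with a rectangular boolean mask that is
-- counted row-wise and column-wise (transpose); same cost, different decomposition ("alternative").

-- ===== PORT A =====
-- _ensure_matrix: on a list[list[str]] every row is a non-str Sequence, so each row becomes list(row)
def pvEnsureMatrixA (matrix : List (List String)) : List (List String) :=
  match matrix with
  | [] => []
  | _ => matrix.map (fun row => row)

-- v = r[j] if j < len(r) else None; the loop tests  not (v is None or str(v).strip() == "")
def pvCellA (r : List String) (j : Nat) : Bool :=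
  match r[j]? with
  | some v => !(PySem.Str.strip v == "")
  | none => false

def is_plausible_table_py (matrix : List (List String)) : Bool :=
  let normalized := pvEnsureMatrixA matrix
  if normalized.isEmpty then false
  else
    let rows := normalized.length
    -- Python max over the (nonempty) lengths; lengths are ≥ 0 so the fold from 0 is that max
    let cols := (normalized.map (fun r => r.length)).foldl Nat.max 0
    if rows < 2 || cols < 2 then false
    else
      let st := normalized.foldl
        (fun (st : List Nat × List Nat) r =>
          let inner := (List.range cols).foldl
            (fun (p : Nat × List Nat) j =>
              if pvCellA r j then (p.1 + 1, p.2.modify j (· + 1)) else p)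
            (0, st.2)
          (st.1 ++ [inner.1], inner.2))
        ([], List.replicate cols 0)
      let rowsWithTwo := st.1.countP (fun c => 2 ≤ c)
      let colsWithTwo := st.2.countP (fun c => 2 ≤ c)
      decide (2 ≤ rowsWithTwo) && decide (2 ≤ colsWithTwo)

-- ===== PORT B =====
-- one mask row: cell j is True iff j < len(r) and the padded cell is meaningful
def pvMaskRow (cols : Nat) (r : List String) : List Bool :=
  (List.range cols).map (fun j =>
    match r[j]? with
    | some v => !(PySem.Str.strip v == "")
    | none => false)

def is_plausible_table_py_alt (matrix : List (List String)) : Bool :=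
  -- _ensure_matrix is the identity on a nonempty list[list[str]]
  match matrix with
  | [] => false
  | _ =>
    let rows := matrix.length
    let cols := (matrix.map (fun r => r.length)).foldl Nat.max 0
    if rows < 2 || cols < 2 then false
    else
      let mask := matrix.map (pvMaskRow cols)
      let rowsWithTwo := mask.countP (fun rm => 2 ≤ rm.countP (fun b => b))
      -- zip(*mask): mask is rectangular (every row has length cols), so the transposed
      -- rows are exactly the columns j = 0 .. cols-1
      let colsWithTwo := ((List.range cols).map
        (fun j => mask.map (fun rm => rm.getD j false))).countP
          (fun cm => 2 ≤ cm.countP (fun b => b))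
      decide (2 ≤ rowsWithTwo) && decide (2 ≤ colsWithTwo)

-- ===== PRECONDITION & SPEC =====
def Spec_is_plausible_table_py (matrix : List (List String)) (out : Bool) : Prop := out = is_plausible_table_py_alt matrix
instance (matrix : List (List String)) (out : Bool) : Decidable (Spec_is_plausible_table_py matrix out) := by unfold Spec_is_plausible_table_py; infer_instance

-- ===== CLAIM (what is proved, stated in full; the proofs are below) =====
def Claim_equal_is_plausible_table_py : Prop := ∀ (matrix : List (List String)), Dom_is_plausible_table_py matrix → Spec_is_plausible_table_py matrix (is_plausible_table_py matrix)

-- ===== LEMMAS AND PROOFS =====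

theorem pvEnsureMatrixA_eq (m : List (List String)) : pvEnsureMatrixA m = m := by
  cases m with
  | nil => rfl
  | cons a as => simp [pvEnsureMatrixA]

-- A's inner loop over one row, as a function of the state
def pvInnerStep (r : List String) : (Nat × List Nat) → Nat → (Nat × List Nat) :=
  fun p j => if pvCellA r j then (p.1 + 1, p.2.modify j (· + 1)) else p

theorem pvInnerStep_eq (r : List String) (p : Nat × List Nat) (j : Nat) :
    pvInnerStep r p j = if pvCellA r j then (p.1 + 1, p.2.modify j (· + 1)) else p := rfl

theorem pvInner_fst (r : List String) (n c0 : Nat) (l0 : List Nat) :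
    ((List.range n).foldl (pvInnerStep r) (c0, l0)).1
      = c0 + (List.range n).countP (pvCellA r) := by
  induction n with
  | zero => simp
  | succ n ih =>
    rw [List.range_succ, List.foldl_append, List.countP_append]
    simp only [List.foldl_cons, List.foldl_nil, List.countP_cons, List.countP_nil]
    rw [pvInnerStep_eq]
    by_cases h : pvCellA r n
    · rw [if_pos h]
      simp only [h, if_true]
      rw [ih]
      omega
    · rw [if_neg h]
      simp only [h, Bool.false_eq_true, if_false]
      rw [ih]
      omega

theorem pvInner_snd_len (r : List String) (n c0 : Nat) (l0 : List Nat) :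
    ((List.range n).foldl (pvInnerStep r) (c0, l0)).2.length = l0.length := by
  induction n with
  | zero => rfl
  | succ n ih =>
    rw [List.range_succ, List.foldl_append]
    simp only [List.foldl_cons, List.foldl_nil]
    rw [pvInnerStep_eq]
    by_cases h : pvCellA r n
    · rw [if_pos h]
      simpa using ih
    · rw [if_neg h]
      exact ih

theorem pvInner_snd_get (r : List String) (n c0 : Nat) (l0 : List Nat) (j : Nat) :
    ((List.range n).foldl (pvInnerStep r) (c0, l0)).2[j]?
      = if pvCellA r j ∧ j < n then l0[j]?.map (· + 1) else l0[j]? := by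
  induction n with
  | zero => simp
  | succ n ih =>
    rw [List.range_succ, List.foldl_append]
    simp only [List.foldl_cons, List.foldl_nil]
    rw [pvInnerStep_eq]
    by_cases hc : pvCellA r n
    · rw [if_pos hc]
      by_cases hj : j = n
      · subst hj
        rw [List.getElem?_modify_eq, ih]
        have h1 : ¬ (pvCellA r j ∧ j < j) := by omega
        have h2 : pvCellA r j ∧ j < j + 1 := ⟨hc, Nat.lt_succ_self j⟩
        rw [if_neg h1, if_pos h2]
        cases l0[j]? <;> rfl
      · rw [List.getElem?_modify_ne _ _ (Ne.symm hj), ih]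
        by_cases h2 : pvCellA r j ∧ j < n
        · rw [if_pos h2, if_pos ⟨h2.1, Nat.lt_succ_of_lt h2.2⟩]
        · rw [if_neg h2, if_neg (by rintro ⟨h3, h4⟩; exact h2 ⟨h3, by omega⟩)]
    · rw [if_neg hc, ih]
      by_cases h2 : pvCellA r j ∧ j < n
      · rw [if_pos h2, if_pos ⟨h2.1, Nat.lt_succ_of_lt h2.2⟩]
      · rw [if_neg h2, if_neg ?_]
        rintro ⟨h3, h4⟩
        rcases Nat.lt_succ_iff_lt_or_eq.mp h4 with h | h
        · exact h2 ⟨h3, h⟩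
        · subst h; exact hc h3

-- A's outer loop
def pvOuterStep (cols : Nat) : (List Nat × List Nat) → List String → (List Nat × List Nat) :=
  fun st r =>
    let inner := (List.range cols).foldl (pvInnerStep r) (0, st.2)
    (st.1 ++ [inner.1], inner.2)

theorem pvOuterStep_eq (cols : Nat) (st : List Nat × List Nat) (r : List String) :
    pvOuterStep cols st r
      = (st.1 ++ [((List.range cols).foldl (pvInnerStep r) (0, st.2)).1],
         ((List.range cols).foldl (pvInnerStep r) (0, st.2)).2) := rfl

theorem pvOuter_fst (cols : Nat) (rs : List (List String)) (acc l0 : List Nat) :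
    (rs.foldl (pvOuterStep cols) (acc, l0)).1
      = acc ++ rs.map (fun r => (List.range cols).countP (pvCellA r)) := by
  induction rs generalizing acc l0 with
  | nil => simp
  | cons r rs ih =>
    simp only [List.foldl_cons, List.map_cons]
    rw [pvOuterStep_eq, ih, pvInner_fst]
    simp

theorem pvOuter_snd_len (cols : Nat) (rs : List (List String)) (acc l0 : List Nat) :
    (rs.foldl (pvOuterStep cols) (acc, l0)).2.length = l0.length := by
  induction rs generalizing acc l0 with
  | nil => rfl
  | cons r rs ih =>
    simp only [List.foldl_cons]
    rw [pvOuterStep_eq, ih, pvInner_snd_len]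

theorem pvOuter_snd_get (cols : Nat) (rs : List (List String)) (acc l0 : List Nat)
    (j : Nat) (hj : j < cols) :
    (rs.foldl (pvOuterStep cols) (acc, l0)).2[j]?
      = l0[j]?.map (· + rs.countP (fun r => pvCellA r j)) := by
  induction rs generalizing acc l0 with
  | nil =>
    simp only [List.foldl_nil, List.countP_nil]
    cases l0[j]? <;> rfl
  | cons r rs ih =>
    simp only [List.foldl_cons, List.countP_cons]
    rw [pvOuterStep_eq, ih, pvInner_snd_get]
    by_cases hc : pvCellA r j
    · rw [if_pos ⟨hc, hj⟩]
      simp only [hc, if_true]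
      cases l0[j]? with
      | none => rfl
      | some x =>
        simp only [Option.map_some]
        congr 1
        omega
    · rw [if_neg (by rintro ⟨h3, _⟩; exact hc h3)]
      simp only [hc, Bool.false_eq_true, if_false]
      cases l0[j]? <;> simp

-- A's final col_counts list equals the list of per-column counts
theorem pvColCounts_eq (cols : Nat) (rs : List (List String)) :
    (rs.foldl (pvOuterStep cols) ([], List.replicate cols 0)).2
      = (List.range cols).map (fun j => rs.countP (fun r => pvCellA r j)) := by
  apply List.ext_getElem?
  intro j
  by_cases hj : j < cols
  · rw [pvOuter_snd_get cols rs [] _ j hj]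
    simp [hj]
  · rw [List.getElem?_eq_none, List.getElem?_eq_none]
    · simp; omega
    · rw [pvOuter_snd_len]; simp; omega

-- B's mask-row count equals A's per-row count
theorem pvMaskRow_count (cols : Nat) (r : List String) :
    (pvMaskRow cols r).countP (fun b => b) = (List.range cols).countP (pvCellA r) := by
  unfold pvMaskRow
  rw [List.countP_map]
  rfl

-- B's column j (extracted from the mask) counts what A's col_counts[j] counts
theorem pvMaskCol_count (cols : Nat) (rs : List (List String)) (j : Nat) (hj : j < cols) :
    ((rs.map (pvMaskRow cols)).map (fun rm => rm.getD j false)).countP (fun b => b)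
      = rs.countP (fun r => pvCellA r j) := by
  rw [List.map_map, List.countP_map]
  apply List.countP_congr
  intro r _
  simp only [Function.comp_apply]
  unfold pvMaskRow
  rw [List.getD, List.getElem?_map, List.getElem?_range hj]
  rfl

theorem pv_main (a : List String) (as : List (List String)) :
    is_plausible_table_py (a :: as) = is_plausible_table_py_alt (a :: as) := by
  unfold is_plausible_table_py is_plausible_table_py_alt
  rw [pvEnsureMatrixA_eq]
  simp only [List.isEmpty_cons, Bool.false_eq_true, if_false]
  set rs := a :: as with hrs
  set cols := (rs.map (fun r => r.length)).foldl Nat.max 0 with hcols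
  by_cases hguard : (decide (rs.length < 2) || decide (cols < 2)) = true
  · rw [if_pos hguard, if_pos hguard]
  · rw [if_neg hguard, if_neg hguard]
    have hfold : rs.foldl
        (fun (st : List Nat × List Nat) r =>
          let inner := (List.range cols).foldl
            (fun (p : Nat × List Nat) j =>
              if pvCellA r j then (p.1 + 1, p.2.modify j (· + 1)) else p)
            (0, st.2)
          (st.1 ++ [inner.1], inner.2))
        ([], List.replicate cols 0)
        = rs.foldl (pvOuterStep cols) ([], List.replicate cols 0) := rfl
    rw [hfold]
    have hrows : (rs.foldl (pvOuterStep cols) ([], List.replicate cols 0)).1.countP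
          (fun c => decide (2 ≤ c))
        = (rs.map (pvMaskRow cols)).countP (fun rm => decide (2 ≤ rm.countP (fun b => b))) := by
      rw [pvOuter_fst, List.nil_append, List.countP_map, List.countP_map]
      apply List.countP_congr
      intro r _
      simp only [Function.comp_apply]
      rw [pvMaskRow_count]
    have hcolsct : (rs.foldl (pvOuterStep cols) ([], List.replicate cols 0)).2.countP
          (fun c => decide (2 ≤ c))
        = ((List.range cols).map
            (fun j => (rs.map (pvMaskRow cols)).map (fun rm => rm.getD j false))).countP
            (fun cm => decide (2 ≤ cm.countP (fun b => b))) := by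
      rw [pvColCounts_eq, List.countP_map, List.countP_map]
      apply List.countP_congr
      intro j hjmem
      simp only [Function.comp_apply]
      rw [pvMaskCol_count cols rs j (List.mem_range.mp hjmem)]
    rw [hrows, hcolsct]

-- ===== VERDICT (by name: the statement is the Claim_ definition above) =====
theorem is_plausible_table_py_spec : Claim_equal_is_plausible_table_py := by
  intro matrix _
  unfold Spec_is_plausible_table_py
  cases matrix with
  | nil => rfl
  | cons a as => exact pv_main a as
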